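-- pv_equiv track=rewrite | github.com/ldobbelsteen/rubik | tools.py | closest_factors
-- ===== SOURCE A (Python) =====
-- def closest_factors(c: int):
--     """Find the two closest factors of a number."""
--     a, b, i = 1, c, 0
--     while a < b:
--         i += 1
--         if c % i == 0:
--             a = i
--             b = c // a
--     return b, a
-- ===== SOURCE B (Python) =====
-- def closest_factors(c: int):
--     """Find the two closest factors of a number."""
--     if c < 1:
--         return c, 1
--     a = 1
--     while (a + 1) * (a + 1) <= c:
--         a += 1
--     while c % a != 0:
--         a -= 1
--     return a, c // a
-- ===== Notes on version B (the rewrite author's own statement) =====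
-- stated objective: alternative
-- what changed: B searches downward from floor(sqrt(c)) for the largest divisor below the square root, instead of A's upward scan over every successive candidate up to the cofactor.
import Mathlib
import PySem

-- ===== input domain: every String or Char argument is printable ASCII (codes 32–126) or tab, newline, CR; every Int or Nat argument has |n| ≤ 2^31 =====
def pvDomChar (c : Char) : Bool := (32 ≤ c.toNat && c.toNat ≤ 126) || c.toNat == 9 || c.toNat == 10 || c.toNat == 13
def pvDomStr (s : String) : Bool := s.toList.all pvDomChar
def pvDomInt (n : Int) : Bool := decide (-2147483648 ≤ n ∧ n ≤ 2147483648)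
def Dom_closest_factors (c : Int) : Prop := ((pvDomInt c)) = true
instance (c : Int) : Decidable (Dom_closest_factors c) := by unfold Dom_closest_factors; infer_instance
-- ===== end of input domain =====

-- B replaces A's upward scan over every successive candidate by a downward search from ⌊√c⌋
-- for the largest divisor below the square root (objective: alternative algorithm).

-- ===== PORT A =====
-- A's while-loop over the state (a, b, i); fuel is only a totality guard (c.toNat + 1 always suffices).
def pvLoopA (c : Int) : Nat → Int × Int × Int → Int × Int × Int
  | 0, s => s
  | f + 1, (a, b, i) =>
    if a < b then
      let i' := i + 1
      if PySem.Int.mod c i' = 0 then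
        pvLoopA c f (i', PySem.Int.floordiv c i', i')
      else
        pvLoopA c f (a, b, i')
    else (a, b, i)

def closest_factors (c : Int) : Int × Int :=
  let s := pvLoopA c (c.toNat + 1) (1, c, 0)
  (s.2.1, s.1)

-- ===== PORT B =====
-- B's first while-loop: a += 1 while (a+1)*(a+1) ≤ c (computes ⌊√c⌋ from a = 1).
def pvIsqrtLoop (c : Int) : Nat → Int → Int
  | 0, a => a
  | f + 1, a => if (a + 1) * (a + 1) ≤ c then pvIsqrtLoop c f (a + 1) else a

-- B's second while-loop: a -= 1 while c % a ≠ 0.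
def pvDescendLoop (c : Int) : Nat → Int → Int
  | 0, a => a
  | f + 1, a => if ¬ (PySem.Int.mod c a = 0) then pvDescendLoop c f (a - 1) else a

def closest_factors_alt (c : Int) : Int × Int :=
  if c < 1 then (c, 1)
  else
    let a := pvDescendLoop c c.toNat (pvIsqrtLoop c c.toNat 1)
    (a, PySem.Int.floordiv c a)

-- ===== PRECONDITION & SPEC =====
def Spec_closest_factors (c : Int) (out : Int × Int) : Prop := out = closest_factors_alt c
instance (c : Int) (out : Int × Int) : Decidable (Spec_closest_factors c out) := by unfold Spec_closest_factors; infer_instance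

-- ===== CLAIM (what is proved, stated in full; the proofs are below) =====
def Claim_equal_closest_factors : Prop := ∀ (c : Int), Dom_closest_factors c → Spec_closest_factors c (closest_factors c)

-- ===== LEMMAS AND PROOFS =====

-- B's isqrt loop: from a with 1 ≤ a, a² ≤ c and enough fuel, it returns s with 1 ≤ s, s² ≤ c < (s+1)².
theorem isqrtLoop_spec (c : Int) : ∀ (f : Nat) (a : Int), 1 ≤ a → a * a ≤ c →
    (c - a).toNat ≤ f →
    1 ≤ pvIsqrtLoop c f a ∧ pvIsqrtLoop c f a * pvIsqrtLoop c f a ≤ c ∧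
      c < (pvIsqrtLoop c f a + 1) * (pvIsqrtLoop c f a + 1) := by
  intro f
  induction f with
  | zero =>
    intro a ha hsq hfuel
    have hca : c ≤ a := by omega
    simp only [pvIsqrtLoop]
    exact ⟨ha, hsq, by nlinarith⟩
  | succ f ih =>
    intro a ha hsq hfuel
    by_cases h : (a + 1) * (a + 1) ≤ c
    · have ha1 : a + 1 ≤ c := by nlinarith
      have := ih (a + 1) (by omega) h (by omega)
      simp only [pvIsqrtLoop]
      rw [if_pos h]
      exact this
    · simp only [pvIsqrtLoop]
      rw [if_neg h]
      exact ⟨ha, hsq, by omega⟩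

-- B's descend loop: from a with 1 ≤ a and enough fuel, it returns the largest divisor of c that is ≤ a.
theorem descendLoop_spec (c : Int) : ∀ (f : Nat) (a : Int), 1 ≤ a → (a - 1).toNat ≤ f →
    1 ≤ pvDescendLoop c f a ∧ pvDescendLoop c f a ≤ a ∧ pvDescendLoop c f a ∣ c ∧
      ∀ e, pvDescendLoop c f a < e → e ≤ a → ¬ e ∣ c := by
  intro f
  induction f with
  | zero =>
    intro a ha hfuel
    have ha1 : a = 1 := by omega
    subst ha1
    simp only [pvDescendLoop]
    exact ⟨le_refl _, le_refl _, one_dvd _, fun e h1 h2 _ => by omega⟩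
  | succ f ih =>
    intro a ha hfuel
    by_cases h : PySem.Int.mod c a = 0
    · simp only [pvDescendLoop, h, not_true_eq_false, if_false]
      exact ⟨ha, le_refl _, (PySem.Int.mod_eq_zero_iff_dvd c a).1 h, fun e h1 h2 _ => by omega⟩
    · have hnd : ¬ a ∣ c := fun hd => h ((PySem.Int.mod_eq_zero_iff_dvd c a).2 hd)
      have ha2 : 2 ≤ a := by
        rcases lt_or_eq_of_le ha with h2 | h2
        · omega
        · exact absurd (h2 ▸ one_dvd c) hnd
      have := ih (a - 1) (by omega) (by omega)
      simp only [pvDescendLoop, h, not_false_eq_true, if_true]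
      refine ⟨this.1, by omega, this.2.2.1, fun e h1 h2 => ?_⟩
      rcases lt_or_eq_of_le h2 with h3 | h3
      · exact this.2.2.2 e h1 (by omega)
      · exact h3 ▸ hnd

-- for c ≥ 1 and d the largest divisor ≤ √c: no divisor of c lies strictly between d and c / d.
theorem no_divisor_between (c d : Int) (hc : 1 ≤ c) (hd1 : 1 ≤ d) (hdvd : d ∣ c)
    (hmax : ∀ e, d < e → e * e ≤ c → ¬ e ∣ c) :
    ∀ e, d < e → e < c / d → ¬ e ∣ c := by
  intro e h1 h2 hedvd
  have he1 : 1 ≤ e := by omega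
  have hec : c = e * (c / e) := (Int.mul_ediv_cancel' hedvd).symm
  have hcd : c = d * (c / d) := (Int.mul_ediv_cancel' hdvd).symm
  by_cases hsq : e * e ≤ c
  · exact hmax e h1 hsq hedvd
  · rw [not_le] at hsq
    have hq1 : 1 ≤ c / e := by nlinarith [hec]
    have hqe : c / e < e := by nlinarith [hec]
    have hdq : d < c / e := by
      have hed : e * d < c := by nlinarith [hcd]
      nlinarith [hec]
    have hqsq : (c / e) * (c / e) ≤ c := by nlinarith [hec]
    exact hmax (c / e) hdq hqsq ⟨e, by linarith [hec, mul_comm e (c / e)]⟩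

-- Simulation of A's loop against B's divisor d, for c ≥ 2.
theorem loopA_sim (c d : Int) (hc : 2 ≤ c) (hd1 : 1 ≤ d) (hdvd : d ∣ c)
    (hdsq : d * d ≤ c) (hmax : ∀ e, d < e → e * e ≤ c → ¬ e ∣ c) :
    ∀ (f : Nat) (a i : Int), 0 ≤ i → i < c / d → 1 ≤ a → a ∣ c → a ≤ d →
      (a = 1 ∨ a ≤ i) → (∀ e, a < e → e ≤ i → ¬ e ∣ c) → (c / d - i).toNat ≤ f →
      pvLoopA c f (a, c / a, i) = (c / d, d, c / d) := by
  have hcd : c = d * (c / d) := (Int.mul_ediv_cancel' hdvd).symm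
  have hda0 : d ≤ c / d := by nlinarith [hcd]
  have ha0dvd : (c / d) ∣ c := ⟨d, by linarith [hcd, mul_comm d (c / d)]⟩
  intro f
  induction f with
  | zero => intro a i h0 h1 _ _ _ _ _ hfuel; omega
  | succ f ih =>
    intro a i h0 h1 ha hadvd had hai hnone hfuel
    have hca : c = a * (c / a) := (Int.mul_ediv_cancel' hadvd).symm
    have hguard : a < c / a := by
      have hasq : a * a < c := by
        rcases lt_or_eq_of_le had with h | h
        · nlinarith
        · subst h
          rcases hai with h2 | h2
          · nlinarith
          · rcases lt_or_eq_of_le hdsq with h3 | h3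
            · exact h3
            · exfalso; nlinarith [hcd]
      nlinarith [hca]
    simp only [pvLoopA, hguard, if_true]
    by_cases hdiv : PySem.Int.mod c (i + 1) = 0
    · have hi1dvd : (i + 1) ∣ c := (PySem.Int.mod_eq_zero_iff_dvd c (i + 1)).1 hdiv
      simp only [hdiv, if_true]
      rw [PySem.Int.floordiv_eq_ediv_of_pos (by omega : (0:Int) < i + 1)]
      rcases lt_or_eq_of_le (by omega : i + 1 ≤ c / d) with hlt | heq
      · -- i+1 is a divisor < c/d, hence i+1 ≤ d
        have hile : i + 1 ≤ d := by
          by_contra hgt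
          exact no_divisor_between c d (by omega) hd1 hdvd hmax (i + 1) (by omega) hlt hi1dvd
        exact ih (i + 1) (i + 1) (by omega) hlt (by omega) hi1dvd hile (Or.inr (le_refl _))
          (fun e he1 he2 => by omega) (by omega)
      · -- i+1 = c/d: new state (c/d, d, c/d); the guard fails on the next check
        have hq1 : 1 ≤ c / d := by omega
        have hq : c / (c / d) = d := by
          set q := c / d with hqd
          have hcq : c = q * d := by linarith [hcd]
          rw [hcq, Int.mul_ediv_cancel_left _ (by omega : q ≠ 0)]
        rw [heq, hq]
        cases f with
        | zero => simp [pvLoopA]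
        | succ f' => simp only [pvLoopA]; rw [if_neg (by omega)]
    · -- i+1 is not a divisor; in particular i+1 ≠ c/d
      have hnd : ¬ (i + 1) ∣ c := fun hd' => hdiv ((PySem.Int.mod_eq_zero_iff_dvd c (i + 1)).2 hd')
      have hne : i + 1 < c / d := by
        rcases lt_or_eq_of_le (by omega : i + 1 ≤ c / d) with h | h
        · exact h
        · exact absurd (h ▸ ha0dvd) hnd
      simp only [hdiv, if_false]
      exact ih a (i + 1) (by omega) hne ha hadvd had (by omega)
        (fun e he1 he2 => by
          rcases lt_or_eq_of_le he2 with h | h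
          · exact hnone e he1 (by omega)
          · exact h ▸ hnd)
        (by omega)

-- ===== VERDICT (by name: the statement is the Claim_ definition above) =====
theorem closest_factors_spec : Claim_equal_closest_factors := by
  unfold Claim_equal_closest_factors
  intro c _
  unfold Spec_closest_factors closest_factors closest_factors_alt
  by_cases hc1 : c < 1
  · -- the loop never runs (1 < c fails); both return (c, 1)
    have : pvLoopA c (c.toNat + 1) (1, c, 0) = (1, c, 0) := by
      simp only [pvLoopA]; rw [if_neg (by omega)]
    rw [this, if_pos hc1]
  · rw [not_lt] at hc1
    rw [if_neg (by omega)]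
    by_cases hc2 : c = 1
    · subst hc2; decide
    · have hc : 2 ≤ c := by omega
      -- characterize B's value d: the largest divisor of c with d² ≤ c
      have hs := isqrtLoop_spec c c.toNat 1 (le_refl _) (by nlinarith) (by omega)
      set s := pvIsqrtLoop c c.toNat 1 with hsdef
      have hsc : s ≤ c := by nlinarith [hs.2.1, hs.1]
      have hdspec := descendLoop_spec c c.toNat s hs.1 (by omega)
      set d := pvDescendLoop c c.toNat s with hddef
      have hd1 : 1 ≤ d := hdspec.1
      have hdvd : d ∣ c := hdspec.2.2.1
      have hdsq : d * d ≤ c := by nlinarith [hdspec.2.1, hs.2.1, hdspec.1, hs.1]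
      have hmax : ∀ e, d < e → e * e ≤ c → ¬ e ∣ c := by
        intro e he1 he2
        have hes : e ≤ s := by nlinarith [hs.2.2]
        exact hdspec.2.2.2 e he1 hes
      have hcd : c = d * (c / d) := (Int.mul_ediv_cancel' hdvd).symm
      have hq1 : 1 ≤ c / d := by nlinarith [hcd]
      have hqc : c / d ≤ c := Int.ediv_le_self d (by omega)
      have hsim := loopA_sim c d hc hd1 hdvd hdsq hmax (c.toNat + 1) 1 0 (le_refl _)
        hq1 (le_refl _) (one_dvd c) hd1 (Or.inl rfl) (fun e h1 h2 => by omega) (by omega)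
      have hc1' : c / 1 = c := Int.ediv_one c
      rw [show ((1 : Int), c, (0 : Int)) = (1, c / 1, 0) by rw [hc1'], hsim]
      show (d, c / d) = (d, PySem.Int.floordiv c d)
      rw [PySem.Int.floordiv_eq_ediv_of_pos (by omega : (0:Int) < d)]
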